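-- pv_equiv track=rewrite | github.com/sacdallago/biotrainer | biotrainer/input_files/utils.py | get_split_lists
-- ===== SOURCE A (Python) =====
-- from typing import List, Dict, Tuple
--
-- def get_split_lists(id2sets: dict) -> Tuple[List[str], List[str], Dict[str, List[str]], List[str]]:
--     """ Parse splits from input_file and check that all set annotations are given and correct """
--     training_ids = []
--     validation_ids = []
--     testing_ids = {}
--     prediction_ids = []
--
--     incorrect_sets_exception = lambda idx, split: ValueError(f"FASTA header must contain SET. "
--                                                              f"Id: {idx}; SET={split}")
--
--     for idx, split in id2sets.items():
--         split = split.lower() if split else ""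
--         if split == "":
--             raise incorrect_sets_exception(idx, split)
--         match split:
--             case "train":
--                 training_ids.append(idx)
--             case "val":
--                 validation_ids.append(idx)
--             case "pred":
--                 prediction_ids.append(idx)
--             case _:  # Treat all other sets as testing sets
--                 if split not in testing_ids:
--                     testing_ids[split] = []
--                 testing_ids[split].append(idx)
--
--     if len(training_ids) == 0:
--         raise ValueError("No training sequences found in input file!")
--     if len(testing_ids) == 0:
--         raise ValueError("No test sets and sequences found in input file!")
--
--     return training_ids, validation_ids, testing_ids, prediction_ids
-- ===== SOURCE B (Python) =====
-- def get_split_lists(id2sets: dict):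
--     """ One grouping pass by normalized split string, then extract the buckets. """
--     groups = {}
--     for idx, split in id2sets.items():
--         key = split.lower() if split else ""
--         groups.setdefault(key, []).append(idx)
--
--     if "" in groups:
--         raise ValueError(f"FASTA header must contain SET. Id: {groups[''][0]}; SET=")
--
--     training_ids = groups.pop("train", [])
--     validation_ids = groups.pop("val", [])
--     prediction_ids = groups.pop("pred", [])
--     testing_ids = groups  # every remaining key is a testing set
--
--     if len(training_ids) == 0:
--         raise ValueError("No training sequences found in input file!")
--     if len(testing_ids) == 0:
--         raise ValueError("No test sets and sequences found in input file!")
--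
--     return training_ids, validation_ids, testing_ids, prediction_ids
-- ===== Notes on version B (the rewrite author's own statement) =====
-- stated objective: alternative
-- what changed: B replaces A's per-item four-way branching into four separate accumulators by one grouping dict keyed on the normalized split string built in a single uniform pass, from which train/val/pred are then popped and the remainder is the testing dict.
import Mathlib
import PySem

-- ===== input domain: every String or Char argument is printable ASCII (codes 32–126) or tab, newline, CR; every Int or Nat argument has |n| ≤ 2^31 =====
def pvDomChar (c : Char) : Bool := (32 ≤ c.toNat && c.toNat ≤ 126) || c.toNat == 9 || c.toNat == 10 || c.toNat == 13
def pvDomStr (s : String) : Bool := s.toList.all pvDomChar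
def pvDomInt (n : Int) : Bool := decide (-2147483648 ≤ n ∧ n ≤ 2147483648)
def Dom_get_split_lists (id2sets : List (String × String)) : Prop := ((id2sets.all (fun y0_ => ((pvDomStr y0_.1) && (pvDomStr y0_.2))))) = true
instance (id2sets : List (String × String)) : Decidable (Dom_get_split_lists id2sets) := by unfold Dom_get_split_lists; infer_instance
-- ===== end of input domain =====

-- B builds one grouping dict keyed on the normalized split string in a single uniform pass,
-- then pops train/val/pred out of it; the remainder is the testing dict (objective: alternative).


-- ===== PORT A =====
-- The Python parameter is a dict; under the type convention it arrives as an association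
-- list, so both ports first rebuild the dict with PySem.Dict.ofList (exact Python dict
-- construction: last value wins, a key keeps its first position) and iterate its items.
-- Where Python A raises (empty split / no training / no testing sets) the port just
-- returns the state it has; those inputs are excluded by Pre_get_split_lists.
def get_split_lists (id2sets : List (String × String)) : List String × List String × (List (String × List String)) × List String :=
  let step := fun (st : List String × List String × PySem.Dict String (List String) × List String)
                  (p : String × String) =>
    let (tr, va, te, pr) := st
    let split := if p.2 = "" then "" else PySem.Str.lower p.2
    if split = "" then (tr, va, te, pr)  -- Python raises here; outside Pre_
    else if split = "train" then (tr ++ [p.1], va, te, pr)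
    else if split = "val" then (tr, va ++ [p.1], te, pr)
    else if split = "pred" then (tr, va, te, pr ++ [p.1])
    else
      let te' := if te.contains split then te else te.insert split []
      (tr, va, te'.modify split [] (· ++ [p.1]), pr)
  let res := ((PySem.Dict.ofList id2sets).items).foldl step ([], [], PySem.Dict.empty, [])
  (res.1, res.2.1, res.2.2.1.items, res.2.2.2)

-- ===== PORT B =====
def get_split_lists_alt (id2sets : List (String × String)) : List String × List String × (List (String × List String)) × List String :=
  let groups := ((PySem.Dict.ofList id2sets).items).foldl
      (fun g p => g.modify (if p.2 = "" then "" else PySem.Str.lower p.2) [] (· ++ [p.1]))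
      PySem.Dict.empty
  -- Python B raises on the "" key here; outside Pre_
  let training := groups.getD "train" []
  let validation := groups.getD "val" []
  let prediction := groups.getD "pred" []
  let testing := ((groups.erase "train").erase "val").erase "pred"
  (training, validation, testing.items, prediction)

-- ===== PRECONDITION & SPEC =====
-- Pre_ excludes exactly the inputs on which A raises a ValueError: some entry with an
-- empty split string, no entry whose normalized split is "train", or no entry whose
-- normalized split lies outside {"train","val","pred"} (no testing set).
def Pre_get_split_lists (id2sets : List (String × String)) : Prop :=
  (∀ p ∈ (PySem.Dict.ofList id2sets).items, p.2 ≠ "") ∧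
  (∃ p ∈ (PySem.Dict.ofList id2sets).items, PySem.Str.lower p.2 = "train") ∧
  (∃ p ∈ (PySem.Dict.ofList id2sets).items,
     PySem.Str.lower p.2 ≠ "train" ∧ PySem.Str.lower p.2 ≠ "val" ∧ PySem.Str.lower p.2 ≠ "pred")
instance (id2sets : List (String × String)) : Decidable (Pre_get_split_lists id2sets) := by
  unfold Pre_get_split_lists; infer_instance

def pvWitness_get_split_lists : (List (String × String)) := [("seq1", "Train"), ("seq2", "test")]

def Spec_get_split_lists (id2sets : List (String × String)) (out : List String × List String × (List (String × List String)) × List String) : Prop := out = get_split_lists_alt id2sets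
instance (id2sets : List (String × String)) (out : List String × List String × (List (String × List String)) × List String) : Decidable (Spec_get_split_lists id2sets out) := by unfold Spec_get_split_lists; infer_instance

-- ===== CLAIM (what is proved, stated in full; the proofs are below) =====
def Claim_equal_get_split_lists : Prop := ∀ (id2sets : List (String × String)), Dom_get_split_lists id2sets → Pre_get_split_lists id2sets → Spec_get_split_lists id2sets (get_split_lists id2sets)

-- ===== LEMMAS AND PROOFS =====

theorem lower_ne_empty {s : String} (h : s ≠ "") : PySem.Str.lower s ≠ "" := by
  intro hl
  apply h
  have hc := congrArg String.toList hl
  rw [PySem.Str.toList_lower] at hc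
  simp at hc
  simp [PySem.Chars.lower] at hc
  exact hc

theorem find?_filter_ne {ν : Type} (k k' : String) (h : k ≠ k') (items : List (String × ν)) :
    List.find? (fun p => p.1 == k) (items.filter (fun p => !(p.1 == k'))) = List.find? (fun p => p.1 == k) items := by
  induction items with
  | nil => rfl
  | cons p rest ih =>
    by_cases hp : p.1 = k
    · simp [hp, h]
    · by_cases hq : p.1 = k' <;> simp [hq, hp, ih, beq_iff_eq, Ne.symm h]

theorem get?_erase_of_ne {ν : Type} (d : PySem.Dict String ν) (k k' : String)
    (h : k ≠ k') : (d.erase k').get? k = d.get? k := by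
  simp only [PySem.Dict.erase, PySem.Dict.get?]
  rw [find?_filter_ne k k' h]

theorem getD_erase_of_ne {ν : Type} (d : PySem.Dict String ν) (k k' : String) (dflt : ν)
    (h : k ≠ k') : (d.erase k').getD k dflt = d.getD k dflt := by
  simp only [PySem.Dict.getD, get?_erase_of_ne _ _ _ h]

theorem contains_erase_of_ne {ν : Type} (d : PySem.Dict String ν) (k k' : String)
    (h : k ≠ k') : (d.erase k').contains k = d.contains k := by
  rw [PySem.Dict.contains_eq_isSome_get?, PySem.Dict.contains_eq_isSome_get?,
    get?_erase_of_ne _ _ _ h]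

theorem erase_insert_of_ne {ν : Type} (d : PySem.Dict String ν) (k k' : String) (v : ν)
    (h : k ≠ k') : (d.insert k v).erase k' = (d.erase k').insert k v := by
  simp only [PySem.Dict.insert, contains_erase_of_ne _ _ _ h]
  by_cases hc : d.contains k = true
  · simp only [hc, if_pos]
    apply PySem.Dict.ext
    simp only [PySem.Dict.erase, List.filter_map]
    rw [List.filter_congr (q := fun p => !(p.1 == k')) ?_]
    intro p _
    by_cases hp : p.1 = k <;> simp [hp]
  · simp only [hc, if_neg, Bool.not_eq_true]
    apply PySem.Dict.ext
    have hkk : (k == k') = false := by simp [h]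
    simp [PySem.Dict.erase, List.filter_append, List.filter, hkk]

theorem erase_insert_self {ν : Type} (d : PySem.Dict String ν) (k : String) (v : ν) :
    (d.insert k v).erase k = d.erase k := by
  simp only [PySem.Dict.insert]
  by_cases hc : d.contains k = true
  · simp only [hc, if_pos]
    apply PySem.Dict.ext
    simp only [PySem.Dict.erase, List.filter_map]
    rw [List.filter_congr (q := fun p => !(p.1 == k)) ?_]
    · rw [List.map_congr_left ?_]
      · exact (List.map_id _)
      · intro p hp
        simp only [List.mem_filter, Bool.not_eq_eq_eq_not, Bool.not_true] at hp
        simp [hp.2]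
    · intro p _
      by_cases hp : p.1 = k <;> simp [hp]
  · simp only [hc, if_neg, Bool.not_eq_true]
    apply PySem.Dict.ext
    simp [PySem.Dict.erase, List.filter_append, List.filter]

theorem erase_modify_of_ne {ν : Type} (d : PySem.Dict String ν) (k k' : String) (d0 : ν)
    (f : ν → ν) (h : k ≠ k') : (d.modify k d0 f).erase k' = (d.erase k').modify k d0 f := by
  simp only [PySem.Dict.modify, erase_insert_of_ne _ _ _ _ h, getD_erase_of_ne _ _ _ _ h]

theorem setdefault_modify {ν : Type} (d : PySem.Dict String ν) (k : String) (dflt : ν)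
    (f : ν → ν) :
    (if d.contains k then d else d.insert k dflt).modify k dflt f = d.modify k dflt f := by
  by_cases hc : d.contains k = true
  · simp [hc]
  · simp only [hc, if_neg, Bool.not_eq_true]
    simp only [PySem.Dict.modify, PySem.Dict.getD_insert_self, PySem.Dict.insert_insert_self]
    rw [PySem.Dict.getD_of_not_contains]
    simpa using hc

theorem getD_modify_of_ne' {ν : Type} (d : PySem.Dict String ν) (k k' : String) (d0 d1 : ν)
    (f : ν → ν) (h : k' ≠ k) : (d.modify k d0 f).getD k' d1 = d.getD k' d1 := by
  simp only [PySem.Dict.modify, PySem.Dict.getD]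
  rw [PySem.Dict.get?_insert_of_ne _ _ h]

-- The loop invariant: A's four accumulators are readable off B's grouping dict.
def rel (st : List String × List String × PySem.Dict String (List String) × List String)
    (g : PySem.Dict String (List String)) : Prop :=
  st.1 = g.getD "train" [] ∧ st.2.1 = g.getD "val" [] ∧ st.2.2.2 = g.getD "pred" [] ∧
  st.2.2.1 = ((g.erase "train").erase "val").erase "pred"

theorem loop_invariant (L : List (String × String))
    (st : List String × List String × PySem.Dict String (List String) × List String)
    (g : PySem.Dict String (List String)) (hrel : rel st g) (hL : ∀ p ∈ L, p.2 ≠ "") :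
    rel (L.foldl (fun st p =>
          let (tr, va, te, pr) := st
          let split := if p.2 = "" then "" else PySem.Str.lower p.2
          if split = "" then (tr, va, te, pr)
          else if split = "train" then (tr ++ [p.1], va, te, pr)
          else if split = "val" then (tr, va ++ [p.1], te, pr)
          else if split = "pred" then (tr, va, te, pr ++ [p.1])
          else
            let te' := if te.contains split then te else te.insert split []
            (tr, va, te'.modify split [] (· ++ [p.1]), pr)) st)
        (L.foldl (fun g p =>
          g.modify (if p.2 = "" then "" else PySem.Str.lower p.2) [] (· ++ [p.1])) g) := by
  induction L generalizing st g with
  | nil => exact hrel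
  | cons p rest ih =>
    obtain ⟨tr, va, te, pr⟩ := st
    obtain ⟨h1, h2, h3, h4⟩ := hrel
    replace h1 : tr = g.getD "train" [] := h1
    replace h2 : va = g.getD "val" [] := h2
    replace h3 : pr = g.getD "pred" [] := h3
    replace h4 : te = ((g.erase "train").erase "val").erase "pred" := h4
    subst h1 h2 h3 h4
    have hp2 : p.2 ≠ "" := hL p (List.mem_cons_self ..)
    have hlow : PySem.Str.lower p.2 ≠ "" := lower_ne_empty hp2
    simp only [List.foldl_cons]
    refine ih _ _ ?_ (fun q hq => hL q (List.mem_cons_of_mem _ hq))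
    simp only [if_neg hp2]
    generalize hk : PySem.Str.lower p.2 = k at hlow ⊢
    rw [if_neg hlow]
    by_cases hktr : k = "train"
    · subst hktr
      rw [if_pos rfl]
      refine ⟨?_, ?_, ?_, ?_⟩
      · simp [PySem.Dict.getD_modify_self]
      · exact (getD_modify_of_ne' _ _ _ _ _ _ (by decide)).symm
      · exact (getD_modify_of_ne' _ _ _ _ _ _ (by decide)).symm
      · simp only [PySem.Dict.modify, erase_insert_self]
    · rw [if_neg hktr]
      by_cases hkva : k = "val"
      · subst hkva
        rw [if_pos rfl]
        refine ⟨?_, ?_, ?_, ?_⟩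
        · exact (getD_modify_of_ne' _ _ _ _ _ _ (by decide)).symm
        · simp [PySem.Dict.getD_modify_self]
        · exact (getD_modify_of_ne' _ _ _ _ _ _ (by decide)).symm
        · simp only [PySem.Dict.modify,
            erase_insert_of_ne _ _ _ _ (by decide : "val" ≠ "train"), erase_insert_self]
      · rw [if_neg hkva]
        by_cases hkpr : k = "pred"
        · subst hkpr
          rw [if_pos rfl]
          refine ⟨?_, ?_, ?_, ?_⟩
          · exact (getD_modify_of_ne' _ _ _ _ _ _ (by decide)).symm
          · exact (getD_modify_of_ne' _ _ _ _ _ _ (by decide)).symm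
          · simp [PySem.Dict.getD_modify_self]
          · simp only [PySem.Dict.modify,
              erase_insert_of_ne _ _ _ _ (by decide : "pred" ≠ "train"),
              erase_insert_of_ne _ _ _ _ (by decide : "pred" ≠ "val"), erase_insert_self]
        · rw [if_neg hkpr]
          refine ⟨?_, ?_, ?_, ?_⟩
          · exact (getD_modify_of_ne' _ _ _ _ _ _ (Ne.symm hktr)).symm
          · exact (getD_modify_of_ne' _ _ _ _ _ _ (Ne.symm hkva)).symm
          · exact (getD_modify_of_ne' _ _ _ _ _ _ (Ne.symm hkpr)).symm
          · dsimp only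
            rw [setdefault_modify,
              erase_modify_of_ne _ _ _ _ _ hktr, erase_modify_of_ne _ _ _ _ _ hkva,
              erase_modify_of_ne _ _ _ _ _ hkpr]

-- ===== VERDICT (by name: the statement is the Claim_ definition above) =====
theorem get_split_lists_spec : Claim_equal_get_split_lists := by
  intro id2sets _hdom hpre
  obtain ⟨hne, _, _⟩ := hpre
  have h := loop_invariant ((PySem.Dict.ofList id2sets).items)
    ([], [], PySem.Dict.empty, []) PySem.Dict.empty
    ⟨rfl, rfl, rfl, rfl⟩ hne
  obtain ⟨h1, h2, h3, h4⟩ := h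
  show _ = get_split_lists_alt id2sets
  simp only [get_split_lists, get_split_lists_alt]
  exact congrArg₂ _ h1 (congrArg₂ _ h2 (congrArg₂ _ (congrArg _ h4) h3))
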